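-- pv_equiv track=rewrite | github.com/nathanielbd/aoc2023 | 1/second.py | build_nums
-- ===== SOURCE A (Python) =====
-- num_dict = {
--     'one': '1',
--     'two': '2',
--     'three': '3',
--     'four': '4',
--     'five': '5',
--     'six': '6',
--     'seven': '7',
--     'eight': '8',
--     'nine': '9'
-- }
--
-- def build_nums(s: str):
--     to_build = ''
--     nums = []
--     for char in s:
--         to_build += char
--         if char in num_dict.values():
--             nums.append(char)
--             to_build = ''
--             continue
--         for key in num_dict:
--             if key in to_build:
--                 nums.append(num_dict[key])
--                 to_build = ''
--                 break
--     return nums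
-- ===== SOURCE B (Python) =====
-- WORDS = {
--     'one': '1',
--     'two': '2',
--     'three': '3',
--     'four': '4',
--     'five': '5',
--     'six': '6',
--     'seven': '7',
--     'eight': '8',
--     'nine': '9'
-- }
--
-- def build_nums(s: str):
--     # Tokenizing skip-scan: at each position try to match a digit or a
--     # spelled-out number word STARTING there; on a match, emit it and jump
--     # past the whole token (A's buffer reset makes matches non-overlapping,
--     # and since no number word contains another, the leftmost-starting token
--     # is exactly the one A's earliest-completion scan finds).
--     nums = []
--     i = 0
--     n = len(s)
--     while i < n:
--         c = s[i]
--         if '1' <= c <= '9':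
--             nums.append(c)
--             i += 1
--             continue
--         for w, d in WORDS.items():
--             if s.startswith(w, i):
--                 nums.append(d)
--                 i += len(w)
--                 break
--         else:
--             i += 1
--     return nums
-- ===== Notes on version B (the rewrite author's own statement) =====
-- stated objective: faster
-- what changed: B replaces A's grow-an-unbounded-buffer scan (which rescans the whole accumulated buffer for every word at each character) by a tokenizing skip-scan: at each index it matches a digit or a number word STARTING there with startswith and jumps past the matched token; correct because A's buffer reset makes matches non-overlapping and no number word contains another, so A's earliest-completing match is exactly the leftmost-starting token.
import Mathlib
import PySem

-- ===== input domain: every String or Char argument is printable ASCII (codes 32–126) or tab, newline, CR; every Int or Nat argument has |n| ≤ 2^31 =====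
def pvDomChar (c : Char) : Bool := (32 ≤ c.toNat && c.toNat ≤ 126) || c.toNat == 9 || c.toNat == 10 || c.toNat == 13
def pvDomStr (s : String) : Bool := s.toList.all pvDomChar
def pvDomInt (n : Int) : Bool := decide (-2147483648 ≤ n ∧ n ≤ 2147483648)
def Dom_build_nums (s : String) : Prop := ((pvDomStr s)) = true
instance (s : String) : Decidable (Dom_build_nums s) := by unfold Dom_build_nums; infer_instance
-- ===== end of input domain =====

-- B replaces A's unbounded-buffer earliest-completion scan by a tokenizing
-- skip-scan that matches a digit or number word starting at each index and
-- jumps past the matched token (objective: faster on long matchless runs).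

-- ===== PORT A =====

-- num_dict as an association list (insertion order), keys as char lists
def pvNumPairs : List (List Char × String) :=
  [("one".toList, "1"), ("two".toList, "2"), ("three".toList, "3"),
   ("four".toList, "4"), ("five".toList, "5"), ("six".toList, "6"),
   ("seven".toList, "7"), ("eight".toList, "8"), ("nine".toList, "9")]

-- num_dict.values() as chars (each value is a 1-char string)
def pvNumVals : List Char := ['1','2','3','4','5','6','7','8','9']

-- the body of A's loop: state = (to_build, nums)
def pvStepA (st : List Char × List String) (c : Char) : List Char × List String :=
  let tb := st.1 ++ [c]            -- to_build += char
  if pvNumVals.contains c then     -- if char in num_dict.values()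
    ([], st.2 ++ [String.mk [c]])
  else
    -- for key in num_dict: if key in to_build: append; break  (first match = find?)
    match pvNumPairs.find? (fun p => decide (p.1 <:+: tb)) with
    | some p => ([], st.2 ++ [p.2])
    | none   => (tb, st.2)

def build_nums (s : String) : List String :=
  (s.toList.foldl pvStepA ([], [])).2

-- ===== PORT B =====

-- B's digit string '123456789' as chars
def pvDigits : List Char := "123456789".toList

-- B's while loop over index i, transcribed as recursion on the remaining
-- suffix s[i:]; `s.startswith(w, i)` is a prefix test on the suffix, and
-- `i += len(w)` drops len(w)-1 further characters beyond the current one.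
def pvGo : List Char → List String
  | [] => []
  | c :: rest =>
    if pvDigits.contains c then               -- if ch in '123456789'
      String.mk [c] :: pvGo rest
    else
      match pvNumPairs.find? (fun p => decide (p.1 <+: (c :: rest))) with
      | some p => p.2 :: pvGo (rest.drop (p.1.length - 1))
      | none   => pvGo rest
termination_by cs => cs.length
decreasing_by
  all_goals simp

def build_nums_alt (s : String) : List String := pvGo s.toList

-- ===== PRECONDITION & SPEC =====
def Spec_build_nums (s : String) (out : List String) : Prop := out = build_nums_alt s
instance (s : String) (out : List String) : Decidable (Spec_build_nums s out) := by unfold Spec_build_nums; infer_instance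

-- ===== CLAIM (what is proved, stated in full; the proofs are below) =====
def Claim_equal_build_nums : Prop := ∀ (s : String), Dom_build_nums s → Spec_build_nums s (build_nums s)

-- ===== LEMMAS AND PROOFS =====

-- "no number word has an occurrence starting inside A's buffer tb
--  (relative to the remaining input cs)"
def pvNoStart (tb cs : List Char) : Prop :=
  ∀ p ∈ pvNumPairs, ∀ j, j < tb.length → ¬ p.1 <+: (tb.drop j ++ cs)

theorem pvNoStart_nil (cs : List Char) : pvNoStart [] cs := by
  intro p _ j hj; simp at hj

-- an infix occurrence has a start index
theorem pvInfix_drop {α : Type} {q X : List α} (h : q <:+: X) :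
    ∃ j, j ≤ X.length ∧ q <+: X.drop j := by
  obtain ⟨s, t, hst⟩ := h
  refine ⟨s.length, ?_, ?_⟩
  · subst hst; simp
  · have : X.drop s.length = q ++ t := by
      subst hst; simp [List.drop_left']
    rw [this]; exact ⟨t, rfl⟩

-- finite facts about the word table
theorem pvF1 : ∀ q ∈ pvNumPairs, 3 ≤ q.1.length := by decide
-- boolean infix check (used only to make pvF2 kernel-checkable)
def pvInfixB (k l : List Char) : Bool :=
  (List.range (l.length + 1)).any (fun j => k.isPrefixOf (l.drop j))

theorem pvInfixB_iff (k l : List Char) : pvInfixB k l = true ↔ k <:+: l := by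
  unfold pvInfixB
  rw [List.any_eq_true]
  constructor
  · rintro ⟨j, hj, hp⟩
    exact (List.isPrefixOf_iff_prefix.mp hp).isInfix.trans (List.drop_suffix j l).isInfix
  · intro h
    obtain ⟨j, hj, hp⟩ := pvInfix_drop h
    exact ⟨j, List.mem_range.mpr (by omega), List.isPrefixOf_iff_prefix.mpr hp⟩

theorem pvF2bool : (pvNumPairs.all (fun q => pvNumPairs.all (fun r =>
    (!(pvInfixB q.1 r.1)) || (q == r)))) = true := by decide

theorem pvF2 : ∀ q ∈ pvNumPairs, ∀ r ∈ pvNumPairs, q.1 <:+: r.1 → q = r := by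
  intro q hq r hr hinf
  have h1 := List.all_eq_true.mp (List.all_eq_true.mp pvF2bool q hq) r hr
  simp only [Bool.or_eq_true, Bool.not_eq_true', beq_iff_eq] at h1
  rcases h1 with h1 | h1
  · exact absurd ((pvInfixB_iff q.1 r.1).mpr hinf) (by simp [h1])
  · exact h1
theorem pvF3bool : (pvNumPairs.all (fun q => q.1.all (fun c => !(pvNumVals.contains c)))) = true := by
  decide

theorem pvF3 : ∀ q ∈ pvNumPairs, ∀ c ∈ q.1, pvNumVals.contains c = false := by
  intro q hq c hc
  have h1 := List.all_eq_true.mp (List.all_eq_true.mp pvF3bool q hq) c hc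
  simpa only [Bool.not_eq_true'] using h1
theorem pvDigits_eq : pvDigits = pvNumVals := by decide

theorem pvPrefix_mono {α : Type} {q u v w : List α} (h : q <+: u ++ v) (hvw : v <+: w) :
    q <+: u ++ w := by
  obtain ⟨t, ht⟩ := hvw
  exact h.trans ⟨t, by rw [← ht, List.append_assoc]⟩

-- two table words that are both prefixes of the same list are equal
theorem pvPrefixUnique {q r : List Char × String} {cs : List Char}
    (hq : q ∈ pvNumPairs) (hr : r ∈ pvNumPairs)
    (h1 : q.1 <+: cs) (h2 : r.1 <+: cs) : q = r := by
  rcases List.prefix_or_prefix_of_prefix h1 h2 with h | h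
  · exact pvF2 q hq r hr h.isInfix
  · exact (pvF2 r hr q hq h.isInfix).symm

-- find? on a predicate that holds exactly at one element present in the list
theorem pvFind?_unique {α : Type} [DecidableEq α] (l : List α) (f : α → Bool) (a : α)
    (ha : a ∈ l) (h : ∀ x ∈ l, f x = true ↔ x = a) : l.find? f = some a := by
  induction l with
  | nil => cases ha
  | cons b l ih =>
    by_cases hb : f b = true
    · have hba := (h b (by simp)).mp hb
      subst hba
      simp [List.find?_cons, hb]
    · have hba : b ≠ a := fun e => hb ((h b (by simp)).mpr e)
      have ha' : a ∈ l := by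
        rcases ha with _ | h'
        · exact absurd rfl hba
        · assumption
      simp only [List.find?_cons]
      rw [Bool.eq_false_iff.mpr hb]
      exact ih ha' (fun x hx => h x (by simp [hx]))

-- during consumption of a word that is a prefix of the input, no word is an
-- infix of the buffer yet (m < word length)
theorem pvNoInfixPartial {tb : List Char} {pe : List Char × String} {rest : List Char}
    (hpe : pe ∈ pvNumPairs) (H : pvNoStart tb (pe.1 ++ rest))
    {m : Nat} (hm : m < pe.1.length) :
    ∀ q ∈ pvNumPairs, ¬ q.1 <:+: (tb ++ pe.1.take m) := by
  intro q hq hinf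
  obtain ⟨j, hj, hpref⟩ := pvInfix_drop hinf
  by_cases hcase : j < tb.length
  · rw [List.drop_append_of_le_length (le_of_lt hcase)] at hpref
    exact H q hq j hcase
      (pvPrefix_mono hpref ((List.take_prefix m pe.1).trans ⟨rest, rfl⟩))
  · have hX : (tb ++ pe.1.take m).drop j = (pe.1.take m).drop (j - tb.length) := by
      rw [show j = tb.length + (j - tb.length) by omega, List.drop_append]
      rw [List.drop_eq_nil_of_le (by omega), Nat.add_sub_cancel_left, List.nil_append]
    rw [hX] at hpref
    have hqpe : q.1 <:+: pe.1 :=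
      hpref.isInfix.trans (((List.drop_suffix _ _).isInfix).trans
        (List.take_prefix m pe.1).isInfix)
    have heq : q = pe := pvF2 q hq pe hpe hqpe
    have hlen : q.1.length ≤ ((pe.1.take m).drop (j - tb.length)).length :=
      hpref.length_le
    rw [heq] at hlen
    simp only [List.length_drop, List.length_take] at hlen
    omega

-- at the completion of the word, the words infix of the buffer are exactly it
theorem pvInfixFull {tb : List Char} {pe : List Char × String} {rest : List Char}
    (hpe : pe ∈ pvNumPairs) (H : pvNoStart tb (pe.1 ++ rest)) :
    ∀ q ∈ pvNumPairs, (q.1 <:+: tb ++ pe.1 ↔ q = pe) := by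
  intro q hq
  constructor
  · intro hinf
    obtain ⟨j, hj, hpref⟩ := pvInfix_drop hinf
    by_cases hcase : j < tb.length
    · rw [List.drop_append_of_le_length (le_of_lt hcase)] at hpref
      exact absurd (pvPrefix_mono hpref ⟨rest, rfl⟩) (H q hq j hcase)
    · have hX : (tb ++ pe.1).drop j = pe.1.drop (j - tb.length) := by
        rw [show j = tb.length + (j - tb.length) by omega, List.drop_append]
        rw [List.drop_eq_nil_of_le (by omega), Nat.add_sub_cancel_left, List.nil_append]
      rw [hX] at hpref
      exact pvF2 q hq pe hpe (hpref.isInfix.trans (List.drop_suffix _ _).isInfix)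
  · intro h
    rw [h]
    exact ((List.suffix_append tb pe.1).isInfix)

-- if no word starts at the head either, stepping A just grows the buffer
theorem pvStepA_grow {tb : List Char} {c : Char} {cs' : List Char} {ns : List String}
    (hd : pvNumVals.contains c = false)
    (H : pvNoStart tb (c :: cs'))
    (hnp : ∀ q ∈ pvNumPairs, ¬ q.1 <+: (c :: cs')) :
    pvStepA (tb, ns) c = (tb ++ [c], ns) := by
  have hfind : pvNumPairs.find? (fun p => decide (p.1 <:+: tb ++ [c])) = none := by
    rw [List.find?_eq_none]
    intro q hq
    simp only [decide_eq_true_eq]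
    intro hinf
    obtain ⟨j, hj, hpref⟩ := pvInfix_drop hinf
    by_cases hcase : j < tb.length
    · rw [List.drop_append_of_le_length (le_of_lt hcase)] at hpref
      exact H q hq j hcase (pvPrefix_mono hpref ⟨cs', rfl⟩)
    · have hlen : q.1.length ≤ ((tb ++ [c]).drop j).length := hpref.length_le
      have h3 := pvF1 q hq
      simp [List.length_drop] at hlen
      omega
  have hd2 : c ∉ pvNumVals := by simpa using hd
  simp [pvStepA, hd2, hfind]

-- consuming the first m < L characters of a prefix word: buffer grows, no fire
theorem pvConsumePartial {tb : List Char} {pe : List Char × String} {rest : List Char}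
    (hpe : pe ∈ pvNumPairs) (H : pvNoStart tb (pe.1 ++ rest)) (ns : List String) :
    ∀ m, m < pe.1.length →
      List.foldl pvStepA (tb, ns) (pe.1.take m) = (tb ++ pe.1.take m, ns) := by
  intro m
  induction m with
  | zero => intro _; simp
  | succ m ih =>
    intro hm
    have hm' : m < pe.1.length := by omega
    have htake : pe.1.take (m + 1) = pe.1.take m ++ [pe.1[m]'hm'] := by
      rw [List.take_succ]
      simp [List.getElem?_eq_getElem hm']
    rw [htake, List.foldl_append, ih hm']
    -- one more step with character pe.1[m]
    have hc : pe.1[m]'hm' ∈ pe.1 := List.getElem_mem hm'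
    have hd : (pe.1[m]'hm') ∉ pvNumVals := by simpa using pvF3 pe hpe _ hc
    have hfind : pvNumPairs.find?
        (fun p => decide (p.1 <:+: tb ++ pe.1.take (m + 1))) = none := by
      rw [List.find?_eq_none]
      intro q hq
      simp only [decide_eq_true_eq]
      intro hinf
      exact pvNoInfixPartial hpe H hm q hq hinf
    simp only [List.foldl_cons, List.foldl_nil]
    simp [pvStepA, hd, hfind]

-- consuming the whole word fires it: buffer resets, the digit is appended
theorem pvConsume {tb : List Char} {pe : List Char × String} {rest : List Char}
    (hpe : pe ∈ pvNumPairs) (H : pvNoStart tb (pe.1 ++ rest)) (ns : List String) :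
    List.foldl pvStepA (tb, ns) pe.1 = ([], ns ++ [pe.2]) := by
  have hL : 3 ≤ pe.1.length := pvF1 pe hpe
  have hm' : pe.1.length - 1 < pe.1.length := by omega
  have hsplit : pe.1 = pe.1.take (pe.1.length - 1) ++ [pe.1[pe.1.length - 1]'hm'] := by
    have h1 : pe.1.take ((pe.1.length - 1) + 1) = pe.1.take (pe.1.length - 1) ++ [pe.1[pe.1.length - 1]'hm'] := by
      rw [List.take_succ]
      simp [List.getElem?_eq_getElem hm']
    rw [← h1, show pe.1.length - 1 + 1 = pe.1.length by omega, List.take_length]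
  conv_lhs => rw [hsplit]
  rw [List.foldl_append, pvConsumePartial hpe H ns _ hm']
  have hc : pe.1[pe.1.length - 1]'hm' ∈ pe.1 := List.getElem_mem hm'
  have hd : (pe.1[pe.1.length - 1]'hm') ∉ pvNumVals := by simpa using pvF3 pe hpe _ hc
  have htake1 : pe.1.take (pe.1.length - 1 + 1) = pe.1 := by
    rw [show pe.1.length - 1 + 1 = pe.1.length by omega]
    exact List.take_length
  have hfind : pvNumPairs.find?
      (fun p => decide (p.1 <:+: tb ++ pe.1.take (pe.1.length - 1 + 1)))
      = some pe := by
    rw [htake1]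
    apply pvFind?_unique _ _ pe hpe
    intro x hx
    simp only [decide_eq_true_eq]
    exact pvInfixFull hpe H x hx
  simp only [List.foldl_cons, List.foldl_nil]
  simp [pvStepA, hd, hfind]

-- unfolding lemmas for pvGo
theorem pvGo_nil : pvGo [] = [] := by simp [pvGo]

theorem pvGo_digit {c : Char} {rest : List Char} (h : pvDigits.contains c = true) :
    pvGo (c :: rest) = String.mk [c] :: pvGo rest := by
  have h' : c ∈ pvDigits := by simpa using h
  rw [pvGo]
  simp [h']

theorem pvGo_match {c : Char} {rest : List Char} {pe : List Char × String}
    (hd : pvDigits.contains c = false)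
    (hf : pvNumPairs.find? (fun p => decide (p.1 <+: (c :: rest))) = some pe) :
    pvGo (c :: rest) = pe.2 :: pvGo (rest.drop (pe.1.length - 1)) := by
  have hd' : c ∉ pvDigits := by simpa using hd
  rw [pvGo]
  simp [hd', hf]

theorem pvGo_skip {c : Char} {rest : List Char}
    (hd : pvDigits.contains c = false)
    (hf : pvNumPairs.find? (fun p => decide (p.1 <+: (c :: rest))) = none) :
    pvGo (c :: rest) = pvGo rest := by
  have hd' : c ∉ pvDigits := by simpa using hd
  rw [pvGo]
  simp [hd', hf]

-- the bridge: A's fold from any buffer with no in-buffer word start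
-- produces exactly B's skip-scan output
theorem pvBridge : ∀ n, ∀ cs : List Char, cs.length ≤ n → ∀ tb ns, pvNoStart tb cs →
    (List.foldl pvStepA (tb, ns) cs).2 = ns ++ pvGo cs := by
  intro n
  induction n with
  | zero =>
    intro cs hcs tb ns _
    have : cs = [] := List.eq_nil_of_length_eq_zero (by omega)
    subst this
    simp [pvGo_nil]
  | succ n ih =>
    intro cs hcs tb ns H
    cases cs with
    | nil => simp [pvGo_nil]
    | cons c cs' =>
      by_cases hd : pvNumVals.contains c = true
      · -- digit: both emit the character and reset
        have hstep : pvStepA (tb, ns) c = ([], ns ++ [String.mk [c]]) := by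
          have hd2 : c ∈ pvNumVals := by simpa using hd
          simp [pvStepA, hd2]
        simp only [List.foldl_cons, hstep]
        rw [ih cs' (by simp at hcs; omega) [] (ns ++ [String.mk [c]]) (pvNoStart_nil cs')]
        rw [pvGo_digit (by rw [pvDigits_eq]; exact hd)]
        simp
      · have hd' : pvNumVals.contains c = false := by
          cases h : pvNumVals.contains c
          · rfl
          · exact absurd h hd
        by_cases hp : ∃ pe ∈ pvNumPairs, pe.1 <+: (c :: cs')
        · -- a word starts here: A consumes it and fires; B matches and skips it
          obtain ⟨pe, hpe, hpre⟩ := hp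
          obtain ⟨rest, hrest⟩ := hpre
          rw [← hrest] at H ⊢
          rw [List.foldl_append, pvConsume hpe H ns]
          have hL : 3 ≤ pe.1.length := pvF1 pe hpe
          have hlen : pe.1.length + rest.length = cs'.length + 1 := by
            have := congrArg List.length hrest
            simpa using this
          rw [ih rest (by simp only [List.length_cons] at hcs; omega) [] (ns ++ [pe.2]) (pvNoStart_nil rest)]
          -- B side: the word is found as a prefix and skipped
          cases hw : pe.1 with
          | nil => rw [hw] at hL; simp at hL
          | cons wc wt =>
            have hfindB : pvNumPairs.find?
                (fun p => decide (p.1 <+: (wc :: (wt ++ rest)))) = some pe := by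
              apply pvFind?_unique _ _ pe hpe
              intro x hx
              simp only [decide_eq_true_eq]
              constructor
              · intro hxp
                exact pvPrefixUnique hx hpe hxp (by rw [hw]; exact ⟨rest, by simp⟩)
              · rintro rfl
                rw [hw]
                exact ⟨rest, by simp⟩
            have hdw : pvDigits.contains wc = false := by
              rw [pvDigits_eq]
              exact pvF3 pe hpe wc (by rw [hw]; simp)
            simp only [List.cons_append]
            rw [pvGo_match hdw hfindB]
            have hdrop : (wt ++ rest).drop (pe.1.length - 1) = rest := by
              have hwl : pe.1.length - 1 = wt.length := by rw [hw]; simp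
              rw [hwl, List.drop_left]
            rw [hdrop]
            simp
        · -- nothing starts here: A grows the buffer, B advances one character
          push_neg at hp
          have hnp : ∀ q ∈ pvNumPairs, ¬ q.1 <+: (c :: cs') := hp
          simp only [List.foldl_cons, pvStepA_grow hd' H hnp]
          have H' : pvNoStart (tb ++ [c]) cs' := by
            intro q hq j hj
            simp only [List.length_append, List.length_cons, List.length_nil] at hj
            by_cases hjc : j < tb.length
            · rw [List.drop_append_of_le_length (le_of_lt hjc), List.append_assoc]
              exact H q hq j hjc
            · have : j = tb.length := by omega
              subst this
              rw [List.drop_append_of_le_length (le_refl _)]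
              simp only [List.drop_length, List.nil_append, List.singleton_append]
              exact hnp q hq
          rw [ih cs' (by simp at hcs; omega) (tb ++ [c]) ns H']
          have hfindB : pvNumPairs.find?
              (fun p => decide (p.1 <+: (c :: cs'))) = none := by
            rw [List.find?_eq_none]
            intro q hq
            simpa using hnp q hq
          rw [pvGo_skip (by rw [pvDigits_eq]; exact hd') hfindB]

-- ===== VERDICT (by name: the statement is the Claim_ definition above) =====
theorem build_nums_spec : Claim_equal_build_nums := by
  intro s _
  unfold Spec_build_nums build_nums build_nums_alt
  rw [pvBridge s.toList.length s.toList (le_refl _) [] [] (pvNoStart_nil _)]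
  simp
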